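-- pv_equiv track=rewrite | github.com/mini0-0/Practice_Programmers | python/퍼즐조각채우기_84021.py | extract_shapes
-- ===== SOURCE A (Python) =====
-- from collections import deque
--
-- def bfs(x, y, visited, board, target):
--     queue = deque()
--     queue.append((x, y))
--     visited[x][y] = True
--     shape = [(x, y)]
--
--     directions = [(-1,0), (1,0), (0,-1), (0,1)]
--
--     while queue:
--         cx, cy = queue.popleft()
--         for dx, dy in directions:
--             nx, ny = cx+dx, cy+dy
--             if 0<=nx<len(board) and 0<=ny<len(board) and not visited[nx][ny] and board[nx][ny] == target:
--                 visited[nx][ny] = True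
--                 queue.append((nx, ny))
--                 shape.append((nx, ny))
--     return shape
--
-- def normalize(shape):
--     min_x = min(x for x, y in shape)
--     min_y = min(y for x, y in shape)
--     normalized = sorted((x - min_x, y - min_y) for x, y in shape)
--     return normalized
--
-- def extract_shapes(board, target):
--     visited = [[False]*len(board) for _ in range(len(board))]
--     shapes = []
--     for i in range(len(board)):
--         for j in range(len(board)):
--             if not visited[i][j] and board[i][j] == target:
--                 shape = bfs(i, j, visited, board, target)
--                 shapes.append(normalize(shape))
--     return shapes
-- ===== SOURCE B (Python) =====
-- def extract_shapes(board, target):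
--     n = len(board)
--     seen = set()
--     shapes = []
--     for i in range(n):
--         for j in range(n):
--             if (i, j) not in seen and board[i][j] == target:
--                 comp = {(i, j)}
--                 while True:
--                     grow = {(x + dx, y + dy)
--                             for (x, y) in comp
--                             for (dx, dy) in ((-1, 0), (1, 0), (0, -1), (0, 1))
--                             if 0 <= x + dx < n and 0 <= y + dy < n
--                             and (x + dx, y + dy) not in comp
--                             and (x + dx, y + dy) not in seen
--                             and board[x + dx][y + dy] == target}
--                     if not grow:
--                         break
--                     comp |= grow
--                 seen |= comp
--                 min_x = min(x for x, y in comp)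
--                 min_y = min(y for x, y in comp)
--                 shapes.append(sorted((x - min_x, y - min_y) for x, y in comp))
--     return shapes
-- ===== Notes on version B (the rewrite author's own statement) =====
-- stated objective: alternative
-- what changed: Replaces per-cell queue BFS with a visited matrix by a frontier-set saturation flood fill (repeatedly union the component with all fresh in-grid target neighbours of the whole set) over a single 'seen' set of cells instead of an n-by-n boolean matrix.
import Mathlib
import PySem

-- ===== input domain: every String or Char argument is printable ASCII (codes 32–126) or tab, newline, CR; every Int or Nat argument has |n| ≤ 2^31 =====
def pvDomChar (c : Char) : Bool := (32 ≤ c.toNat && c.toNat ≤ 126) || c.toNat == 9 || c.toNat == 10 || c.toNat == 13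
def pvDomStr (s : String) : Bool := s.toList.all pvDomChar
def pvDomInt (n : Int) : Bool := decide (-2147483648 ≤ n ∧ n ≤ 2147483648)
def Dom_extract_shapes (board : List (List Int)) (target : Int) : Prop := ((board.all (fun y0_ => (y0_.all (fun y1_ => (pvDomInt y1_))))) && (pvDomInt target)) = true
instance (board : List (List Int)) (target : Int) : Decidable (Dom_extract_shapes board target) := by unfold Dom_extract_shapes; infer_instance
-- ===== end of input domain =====

-- B replaces the queue BFS + n×n visited matrix by a frontier-set saturation flood fill over a single
-- 'seen' set (objective: alternative, not faster). Python A mutates its `visited` argument in place;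
-- the ports thread the visited matrix functionally and the equivalence is about the return value.

-- shared cell accessors (board[x][y], visited[x][y], visited[x][y] = True);
-- indices are guarded 0 ≤ x,y < len(board) at every use site, so pyGetD/pySetD defaults are never hit on Pre_
def pvAt (board : List (List Int)) (x y : Int) : Int := PySem.List.pyGetD (PySem.List.pyGetD board x []) y 0
def pvVAt (v : List (List Bool)) (x y : Int) : Bool := PySem.List.pyGetD (PySem.List.pyGetD v x []) y false
def pvVSet (v : List (List Bool)) (x y : Int) : List (List Bool) := PySem.List.pySetD v x (PySem.List.pySetD (PySem.List.pyGetD v x []) y true)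
def pvDirs : List (Int × Int) := [(-1,0), (1,0), (0,-1), (0,1)]

-- ===== PORT A =====
-- one iteration of `for dx, dy in directions: …` in bfs; state = (queue, visited, shape)
def dstepA (board : List (List Int)) (target : Int) (c : Int × Int)
    (st : List (Int × Int) × List (List Bool) × List (Int × Int)) (d : Int × Int) :
    List (Int × Int) × List (List Bool) × List (Int × Int) :=
  let nx := c.1 + d.1
  let ny := c.2 + d.2
  if 0 ≤ nx ∧ nx < PySem.List.len board ∧ 0 ≤ ny ∧ ny < PySem.List.len board ∧
     pvVAt st.2.1 nx ny = false ∧ pvAt board nx ny = target then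
    (st.1 ++ [(nx, ny)], pvVSet st.2.1 nx ny, st.2.2 ++ [(nx, ny)])
  else st

-- `while queue:` of bfs; fuel only totalizes the loop (lemma bfsLoop_run shows the fuel passed is never exhausted)
def bfsLoopA (board : List (List Int)) (target : Int) :
    Nat → List (Int × Int) → List (List Bool) → List (Int × Int) → List (Int × Int) × List (List Bool)
  | 0, _, v, s => (s, v)
  | _ + 1, [], v, s => (s, v)
  | f + 1, c :: rest, v, s =>
      let st := pvDirs.foldl (dstepA board target c) (rest, v, s)
      bfsLoopA board target f st.1 st.2.1 st.2.2

-- bfs(x, y, visited, board, target); returns (shape, visited) since Python mutates visited in place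
def bfsA (x y : Int) (visited : List (List Bool)) (board : List (List Int)) (target : Int) :
    List (Int × Int) × List (List Bool) :=
  bfsLoopA board target (5 * board.length * board.length + 1) [(x, y)] (pvVSet visited x y) [(x, y)]

-- normalize(shape); shape is never empty, so the .getD 0 default of min() is never hit
def normalizeA (shape : List (Int × Int)) : List (Int × Int) :=
  let min_x := (PySem.List.min? (shape.map (fun p => p.1)) (fun x => x)).getD 0
  let min_y := (PySem.List.min? (shape.map (fun p => p.2)) (fun x => x)).getD 0
  PySem.List.sorted2 (shape.map (fun p => (p.1 - min_x, p.2 - min_y))) (fun p => p.1) (fun p => p.2)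

-- body of the double scan over i, j; state = (visited, shapes)
def outerBodyA (board : List (List Int)) (target : Int)
    (st : List (List Bool) × List (List (Int × Int))) (p : Int × Int) :
    List (List Bool) × List (List (Int × Int)) :=
  if pvVAt st.1 p.1 p.2 = false ∧ pvAt board p.1 p.2 = target then
    let r := bfsA p.1 p.2 st.1 board target
    (r.2, st.2 ++ [normalizeA r.1])
  else st

def extract_shapes (board : List (List Int)) (target : Int) : List (List (Int × Int)) :=
  ((PySem.List.pyRange 0 (PySem.List.len board) 1).foldl (fun st i =>
      (PySem.List.pyRange 0 (PySem.List.len board) 1).foldl (fun st j => outerBodyA board target st (i, j)) st)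
    (List.replicate board.length (List.replicate board.length false), ([] : List (List (Int × Int))))).2

-- ===== PORT B =====
-- the `grow = {…}` set comprehension: all fresh in-grid target neighbours of the whole component
def gstepB (board : List (List Int)) (target : Int) (seen comp : PySem.Set (Int × Int))
    (c : Int × Int) (g : PySem.Set (Int × Int)) (d : Int × Int) : PySem.Set (Int × Int) :=
  let nx := c.1 + d.1
  let ny := c.2 + d.2
  if 0 ≤ nx ∧ nx < PySem.List.len board ∧ 0 ≤ ny ∧ ny < PySem.List.len board ∧
     PySem.Set.contains comp (nx, ny) = false ∧ PySem.Set.contains seen (nx, ny) = false ∧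
     pvAt board nx ny = target then
    PySem.Set.add g (nx, ny)
  else g

def growOnceB (board : List (List Int)) (target : Int) (seen comp : PySem.Set (Int × Int)) :
    PySem.Set (Int × Int) :=
  comp.foldl (fun g c => pvDirs.foldl (gstepB board target seen comp c) g) PySem.Set.empty

-- the `while True: … break` saturation loop; fuel only totalizes it (lemma satLoop_run)
def satLoopB (board : List (List Int)) (target : Int) (seen : PySem.Set (Int × Int)) :
    Nat → PySem.Set (Int × Int) → PySem.Set (Int × Int)
  | 0, comp => comp
  | f + 1, comp =>
      let g := growOnceB board target seen comp
      if g.isEmpty then comp else satLoopB board target seen f (PySem.Set.union comp g)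

-- min/min/sorted tail of B's loop body; comp is never empty, so the .getD 0 default of min() is never hit
def normalizeB (comp : List (Int × Int)) : List (Int × Int) :=
  let min_x := (PySem.List.min? (comp.map (fun p => p.1)) (fun x => x)).getD 0
  let min_y := (PySem.List.min? (comp.map (fun p => p.2)) (fun x => x)).getD 0
  PySem.List.sorted2 (comp.map (fun p => (p.1 - min_x, p.2 - min_y))) (fun p => p.1) (fun p => p.2)

-- body of the double scan over i, j; state = (seen, shapes)
def outerBodyB (board : List (List Int)) (target : Int)
    (st : PySem.Set (Int × Int) × List (List (Int × Int))) (p : Int × Int) :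
    PySem.Set (Int × Int) × List (List (Int × Int)) :=
  if PySem.Set.contains st.1 p = false ∧ pvAt board p.1 p.2 = target then
    let comp := satLoopB board target st.1 (board.length * board.length + 1)
      (PySem.Set.add PySem.Set.empty p)
    (PySem.Set.union st.1 comp, st.2 ++ [normalizeB comp])
  else st

def extract_shapes_alt (board : List (List Int)) (target : Int) : List (List (Int × Int)) :=
  ((PySem.List.pyRange 0 (PySem.List.len board) 1).foldl (fun st i =>
      (PySem.List.pyRange 0 (PySem.List.len board) 1).foldl (fun st j => outerBodyB board target st (i, j)) st)
    ((PySem.Set.empty : PySem.Set (Int × Int)), ([] : List (List (Int × Int))))).2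

-- ===== PRECONDITION & SPEC =====
-- Pre_ excludes exactly the boards with a row shorter than len(board): there Python A (and B) raise IndexError.
def Pre_extract_shapes (board : List (List Int)) (target : Int) : Prop :=
  ∀ row ∈ board, board.length ≤ row.length
instance (board : List (List Int)) (target : Int) : Decidable (Pre_extract_shapes board target) := by
  unfold Pre_extract_shapes; infer_instance
def pvWitness_extract_shapes : List (List Int) × Int := ([[1, 0], [0, 1]], 1)

def Spec_extract_shapes (board : List (List Int)) (target : Int) (out : List (List (Int × Int))) : Prop := out = extract_shapes_alt board target
instance (board : List (List Int)) (target : Int) (out : List (List (Int × Int))) : Decidable (Spec_extract_shapes board target out) := by unfold Spec_extract_shapes; infer_instance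

-- ===== CLAIM (what is proved, stated in full; the proofs are below) =====
def Claim_equal_extract_shapes : Prop := ∀ (board : List (List Int)) (target : Int), Dom_extract_shapes board target → Pre_extract_shapes board target → Spec_extract_shapes board target (extract_shapes board target)

-- ===== LEMMAS AND PROOFS =====

-- abstract vocabulary: grid membership, admissible cells, one-step adjacency, reachability
def pvInGrid (n : Nat) (c : Int × Int) : Prop := 0 ≤ c.1 ∧ c.1 < (n : Int) ∧ 0 ≤ c.2 ∧ c.2 < (n : Int)

def pvOk (board : List (List Int)) (target : Int) (P₀ : Int × Int → Prop) (c : Int × Int) : Prop :=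
  pvInGrid board.length c ∧ pvAt board c.1 c.2 = target ∧ ¬ P₀ c

def pvAdj (board : List (List Int)) (target : Int) (P₀ : Int × Int → Prop) (c d : Int × Int) : Prop :=
  (∃ dd ∈ pvDirs, d = (c.1 + dd.1, c.2 + dd.2)) ∧ pvOk board target P₀ d

def pvReach (board : List (List Int)) (target : Int) (P₀ : Int × Int → Prop) (a c : Int × Int) : Prop :=
  Relation.ReflTransGen (pvAdj board target P₀) a c

-- the visited matrix represents a predicate on grid cells
def pvVisOk (n : Nat) (v : List (List Bool)) (P : Int × Int → Prop) : Prop :=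
  v.length = n ∧ (∀ r ∈ v, r.length = n) ∧ ∀ c : Int × Int, pvInGrid n c → (pvVAt v c.1 c.2 = true ↔ P c)

theorem pvVisOk_congr {n : Nat} {v : List (List Bool)} {P P' : Int × Int → Prop}
    (h : pvVisOk n v P) (hpp : ∀ c, pvInGrid n c → (P c ↔ P' c)) : pvVisOk n v P' := by
  refine ⟨h.1, h.2.1, fun c hc => ?_⟩
  rw [h.2.2 c hc, hpp c hc]

theorem pvVisOk_init (n : Nat) :
    pvVisOk n (List.replicate n (List.replicate n false)) (fun _ => False) := by
  refine ⟨by simp, fun r hr => by rw [List.eq_of_mem_replicate hr]; simp, fun c hc => ?_⟩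
  obtain ⟨h1, h2, h3, h4⟩ := hc
  rw [pvVAt, PySem.List.pyGetD_eq_getElem _ _ h1 (by simpa using h2)]
  rw [List.getElem_replicate, PySem.List.pyGetD_eq_getElem _ _ h3 (by simpa using h4)]
  simp

theorem pvVisOk_set {n : Nat} {v : List (List Bool)} {P : Int × Int → Prop} {c : Int × Int}
    (h : pvVisOk n v P) (hc : pvInGrid n c) :
    pvVisOk n (pvVSet v c.1 c.2) (fun d => d = c ∨ P d) := by
  obtain ⟨hl, hr, hv⟩ := h
  obtain ⟨h1, h2, h3, h4⟩ := hc
  have hlt1 : c.1.toNat < v.length := by omega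
  have row : PySem.List.pyGetD v c.1 ([] : List Bool) = v[c.1.toNat] :=
    PySem.List.pyGetD_eq_getElem _ _ h1 (by omega)
  have hrowlen : v[c.1.toNat].length = n := hr _ (List.getElem_mem _)
  refine ⟨?_, ?_, ?_⟩
  · simp [pvVSet, PySem.List.pySetD_of_nonneg _ _ h1, hl]
  · intro r hrm
    rw [pvVSet, PySem.List.pySetD_of_nonneg _ _ h1] at hrm
    rcases List.mem_or_eq_of_mem_set hrm with h' | h'
    · exact hr r h'
    · subst h'
      rw [row, PySem.List.pySetD_of_nonneg _ _ h3, List.length_set, hrowlen]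
  · intro d hd
    obtain ⟨g1, g2, g3, g4⟩ := hd
    have hd1 : d.1.toNat < v.length := by omega
    have hd2 : d.2.toNat < (v[d.1.toNat]'hd1).length := by rw [hr _ (List.getElem_mem _)]; omega
    have heq : pvVAt v d.1 d.2 = (v[d.1.toNat]'hd1)[d.2.toNat]'hd2 := by
      rw [pvVAt, PySem.List.pyGetD_eq_getElem _ _ g1 (by omega)]
      rw [PySem.List.pyGetD_eq_getElem _ _ g3 (by rw [hr _ (List.getElem_mem _)]; omega)]
    rw [pvVAt, pvVSet, PySem.List.pySetD_of_nonneg _ _ h1]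
    rw [PySem.List.pyGetD_eq_getElem _ _ g1 (by simp; omega)]
    rw [List.getElem_set]
    by_cases hx : c.1.toNat = d.1.toNat
    · simp only [if_pos hx]
      rw [row, PySem.List.pySetD_of_nonneg _ _ h3]
      rw [PySem.List.pyGetD_eq_getElem _ _ g3 (by rw [List.length_set, hrowlen]; omega)]
      rw [List.getElem_set]
      by_cases hy : c.2.toNat = d.2.toNat
      · simp only [if_pos hy]
        have hdc : d = c := by
          have e1 : d.1 = c.1 := by omega
          have e2 : d.2 = c.2 := by omega
          exact Prod.ext_iff.mpr ⟨e1, e2⟩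
        simp [hdc]
      · simp only [if_neg hy]
        have hne : d ≠ c := fun e => hy (by rw [e])
        have hrow2 : v[c.1.toNat] = v[d.1.toNat] := getElem_congr rfl hx (by omega)
        have hcell : (v[c.1.toNat]'hlt1)[d.2.toNat]'(by rw [hrowlen]; omega) = (v[d.1.toNat]'hd1)[d.2.toNat]'hd2 :=
          getElem_congr hrow2 rfl _
        rw [hcell, ← heq, hv d ⟨g1, g2, g3, g4⟩]
        simp [hne]
    · simp only [if_neg hx]
      have hne : d ≠ c := fun e => hx (by rw [e])
      rw [PySem.List.pyGetD_eq_getElem (v[d.1.toNat]'hd1) false g3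
        (by rw [hr _ (List.getElem_mem _)]; omega), ← heq, hv d ⟨g1, g2, g3, g4⟩]
      simp [hne]

theorem pvLength_le_sq {n : Nat} {s : List (Int × Int)} (hnd : s.Nodup)
    (h : ∀ c ∈ s, pvInGrid n c) : s.length ≤ n * n := by
  classical
  have hcard : s.length = s.toFinset.card := (List.toFinset_card_of_nodup hnd).symm
  rw [hcard]
  have : s.toFinset.card ≤ ((Finset.range n) ×ˢ (Finset.range n)).card := by
    apply Finset.card_le_card_of_injOn (fun c => (c.1.toNat, c.2.toNat))
    · intro c hc
      have := h c (List.mem_toFinset.mp hc)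
      obtain ⟨a1, a2, a3, a4⟩ := this
      simp
      omega
    · intro a ha b hb hab
      have ha' := h a (List.mem_toFinset.mp ha)
      have hb' := h b (List.mem_toFinset.mp hb)
      obtain ⟨a1, a2, a3, a4⟩ := ha'
      obtain ⟨b1, b2, b3, b4⟩ := hb'
      have e1 : a.1.toNat = b.1.toNat := congrArg Prod.fst hab
      have e2 : a.2.toNat = b.2.toNat := congrArg Prod.snd hab
      exact Prod.ext_iff.mpr ⟨by omega, by omega⟩
  simpa using this

theorem pvLength_lt_of_extra {s t : List (Int × Int)} (hnd : t.Nodup)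
    (hsub : ∀ c ∈ s, c ∈ t) {e : Int × Int} (he : e ∈ t) (hes : e ∉ s) (hs : s.Nodup) :
    s.length < t.length := by
  classical
  have h1 : s.length = s.toFinset.card := (List.toFinset_card_of_nodup hs).symm
  have h2 : t.length = t.toFinset.card := (List.toFinset_card_of_nodup hnd).symm
  rw [h1, h2]
  apply Finset.card_lt_card
  constructor
  · intro c hc; exact List.mem_toFinset.mpr (hsub c (List.mem_toFinset.mp hc))
  · intro hcon
    exact hes (List.mem_toFinset.mp (hcon (List.mem_toFinset.mpr he)))

-- ---- A side ----

theorem dstepA_eq (board : List (List Int)) (target : Int) (c : Int × Int)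
    (q : List (Int × Int)) (v : List (List Bool)) (s : List (Int × Int)) (d : Int × Int) :
    dstepA board target c (q, v, s) d =
      if 0 ≤ c.1 + d.1 ∧ c.1 + d.1 < PySem.List.len board ∧ 0 ≤ c.2 + d.2 ∧
         c.2 + d.2 < PySem.List.len board ∧ pvVAt v (c.1 + d.1) (c.2 + d.2) = false ∧
         pvAt board (c.1 + d.1) (c.2 + d.2) = target then
        (q ++ [(c.1 + d.1, c.2 + d.2)], pvVSet v (c.1 + d.1) (c.2 + d.2), s ++ [(c.1 + d.1, c.2 + d.2)])
      else (q, v, s) := rfl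

theorem stepfoldA (board : List (List Int)) (target : Int) (P₀ Q : Int × Int → Prop)
    (hQ : ∀ a d, Q a → pvAdj board target P₀ a d → Q d) (c : Int × Int) (hcQ : Q c)
    (ds : List (Int × Int)) (hds : ∀ d ∈ ds, d ∈ pvDirs) :
    ∀ (q : List (Int × Int)) (v : List (List Bool)) (s : List (Int × Int)),
      pvVisOk board.length v (fun d => P₀ d ∨ d ∈ s) → s.Nodup →
      (∀ e ∈ s, pvOk board target P₀ e) → (∀ e ∈ s, Q e) →
      ∃ t v',
        ds.foldl (dstepA board target c) (q, v, s) = (q ++ t, v', s ++ t) ∧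
        pvVisOk board.length v' (fun d => P₀ d ∨ d ∈ s ++ t) ∧ (s ++ t).Nodup ∧
        (∀ e ∈ s ++ t, pvOk board target P₀ e) ∧ (∀ e ∈ s ++ t, Q e) ∧
        (∀ dd ∈ ds, pvOk board target P₀ (c.1 + dd.1, c.2 + dd.2) →
          (c.1 + dd.1, c.2 + dd.2) ∈ s ++ t) := by
  induction ds with
  | nil =>
    intro q v s hvis hnd hok hq
    exact ⟨[], v, by simp, by simpa using hvis, by simpa using hnd,
      by simpa using hok, by simpa using hq, by simp⟩
  | cons dd ds ih =>
    intro q v s hvis hnd hok hq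
    have hds' : ∀ d ∈ ds, d ∈ pvDirs := fun d hd => hds d (List.mem_cons_of_mem _ hd)
    rw [List.foldl_cons, dstepA_eq]
    set e : Int × Int := (c.1 + dd.1, c.2 + dd.2) with he
    by_cases hcond : 0 ≤ c.1 + dd.1 ∧ c.1 + dd.1 < PySem.List.len board ∧ 0 ≤ c.2 + dd.2 ∧
        c.2 + dd.2 < PySem.List.len board ∧ pvVAt v (c.1 + dd.1) (c.2 + dd.2) = false ∧
        pvAt board (c.1 + dd.1) (c.2 + dd.2) = target
    · rw [if_pos hcond]
      obtain ⟨k1, k2, k3, k4, k5, k6⟩ := hcond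
      have hgrid : pvInGrid board.length e := by
        refine ⟨k1, ?_, k3, ?_⟩ <;> simpa [PySem.List.len_eq] using ‹_›
      have hnotvis : ¬ (P₀ e ∨ e ∈ s) := by
        intro hmem
        have := (hvis.2.2 e hgrid).mpr hmem
        rw [he] at this
        simp [this] at k5
      have hnP : ¬ P₀ e := fun h' => hnotvis (Or.inl h')
      have hnmem : e ∉ s := fun h' => hnotvis (Or.inr h')
      have hoke : pvOk board target P₀ e := ⟨hgrid, k6, hnP⟩
      have hadj : pvAdj board target P₀ c e := ⟨⟨dd, hds dd List.mem_cons_self, rfl⟩, hoke⟩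
      have hQe : Q e := hQ c e hcQ hadj
      have hvis' : pvVisOk board.length (pvVSet v e.1 e.2) (fun d => P₀ d ∨ d ∈ s ++ [e]) := by
        refine pvVisOk_congr (pvVisOk_set hvis hgrid) (fun d _ => ?_)
        simp only [List.mem_append, List.mem_singleton]
        tauto
      have hnd' : (s ++ [e]).Nodup := by
        rw [List.nodup_append]
        refine ⟨hnd, List.nodup_singleton _, ?_⟩
        intro a ha b hb
        rw [List.mem_singleton.mp hb]
        exact fun hab => hnmem (hab ▸ ha)
      have hok' : ∀ x ∈ s ++ [e], pvOk board target P₀ x := by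
        intro x hx
        rcases List.mem_append.mp hx with h' | h'
        · exact hok x h'
        · rw [List.mem_singleton.mp h']; exact hoke
      have hq' : ∀ x ∈ s ++ [e], Q x := by
        intro x hx
        rcases List.mem_append.mp hx with h' | h'
        · exact hq x h'
        · rw [List.mem_singleton.mp h']; exact hQe
      obtain ⟨t, v', heq, hv2, hn2, ho2, hq2, hcov⟩ :=
        ih hds' (q ++ [e]) (pvVSet v e.1 e.2) (s ++ [e]) hvis' hnd' hok' hq'
      refine ⟨e :: t, v', ?_, ?_, ?_, ?_, ?_, ?_⟩
      · rw [heq]; simp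
      · simpa using hv2
      · simpa using hn2
      · simpa using ho2
      · simpa using hq2
      · intro d hd hokd
        rcases List.mem_cons.mp hd with h' | h'
        · subst h'
          exact List.mem_append.mpr (Or.inr List.mem_cons_self)
        · have := hcov d h' hokd
          simpa using this
    · rw [if_neg hcond]
      obtain ⟨t, v', heq, hv2, hn2, ho2, hq2, hcov⟩ := ih hds' q v s hvis hnd hok hq
      refine ⟨t, v', heq, hv2, hn2, ho2, hq2, ?_⟩
      intro d hd hokd
      rcases List.mem_cons.mp hd with h' | h'
      · subst h'
        have hmem : e ∈ s := by
          obtain ⟨hg, ht, hnp⟩ := hokd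
          obtain ⟨a1, a2, a3, a4⟩ := hg
          have hvt : pvVAt v e.1 e.2 = true ∨ pvVAt v e.1 e.2 = false := by
            cases pvVAt v e.1 e.2 <;> simp
          rcases hvt with h'' | h''
          · rcases (hvis.2.2 e ⟨a1, a2, a3, a4⟩).mp h'' with hp | hm
            · exact absurd hp hnp
            · exact hm
          · exact absurd ⟨a1, by simpa [PySem.List.len_eq] using a2, a3,
              by simpa [PySem.List.len_eq] using a4, h'', ht⟩ hcond
        exact List.mem_append.mpr (Or.inl hmem)
      · exact hcov d h' hokd


theorem bfsLoop_run (board : List (List Int)) (target : Int) (P₀ Q : Int × Int → Prop)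
    (hQ : ∀ a d, Q a → pvAdj board target P₀ a d → Q d) :
    ∀ (fuel : Nat) (q : List (Int × Int)) (v : List (List Bool)) (s : List (Int × Int)),
      pvVisOk board.length v (fun d => P₀ d ∨ d ∈ s) → s.Nodup →
      (∀ e ∈ s, pvOk board target P₀ e) → (∀ e ∈ q, e ∈ s) →
      (∀ e ∈ s, e ∉ q → ∀ d, pvAdj board target P₀ e d → d ∈ s) → (∀ e ∈ s, Q e) →
      5 * (board.length * board.length - s.length) + q.length ≤ fuel →
      ∃ s' v',
        bfsLoopA board target fuel q v s = (s', v') ∧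
        pvVisOk board.length v' (fun d => P₀ d ∨ d ∈ s') ∧ s'.Nodup ∧
        (∀ e ∈ s, e ∈ s') ∧ (∀ e ∈ s', pvOk board target P₀ e) ∧ (∀ e ∈ s', Q e) ∧
        (∀ e ∈ s', ∀ d, pvAdj board target P₀ e d → d ∈ s') := by
  intro fuel
  induction fuel with
  | zero =>
    intro q v s hvis hnd hok hsub hcl hq hfuel
    have hq0 : q = [] := by
      cases q with
      | nil => rfl
      | cons a t => simp at hfuel
    subst hq0
    exact ⟨s, v, rfl, hvis, hnd, fun e he => he, hok, hq,
      fun e he d hd => hcl e he (by simp) d hd⟩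
  | succ f ih =>
    intro q v s hvis hnd hok hsub hcl hq hfuel
    cases q with
    | nil =>
      exact ⟨s, v, rfl, hvis, hnd, fun e he => he, hok, hq,
        fun e he d hd => hcl e he (by simp) d hd⟩
    | cons c rest =>
      have hcs : c ∈ s := hsub c List.mem_cons_self
      obtain ⟨t, v', heq, hv2, hn2, ho2, hq2, hcov⟩ :=
        stepfoldA board target P₀ Q hQ c (hq c hcs) pvDirs (fun d hd => hd)
          rest v s hvis hnd hok hq
      have hsub' : ∀ e ∈ rest ++ t, e ∈ s ++ t := by
        intro e he
        rcases List.mem_append.mp he with h' | h'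
        · exact List.mem_append.mpr (Or.inl (hsub e (List.mem_cons_of_mem _ h')))
        · exact List.mem_append.mpr (Or.inr h')
      have hcl' : ∀ e ∈ s ++ t, e ∉ rest ++ t → ∀ d, pvAdj board target P₀ e d → d ∈ s ++ t := by
        intro e he hnin d hd
        rcases List.mem_append.mp he with h' | h'
        · by_cases hec : e = c
          · subst hec
            obtain ⟨⟨dd, hdd, hdeq⟩, hokd⟩ := hd
            subst hdeq
            exact hcov dd hdd hokd
          · have : e ∉ c :: rest := by
              intro hmem
              rcases List.mem_cons.mp hmem with h'' | h''
              · exact hec h''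
              · exact hnin (List.mem_append.mpr (Or.inl h''))
            exact List.mem_append.mpr (Or.inl (hcl e h' this d hd))
        · exact absurd (List.mem_append.mpr (Or.inr h')) hnin
      have hlen : (s ++ t).length ≤ board.length * board.length :=
        pvLength_le_sq hn2 (fun x hx => (ho2 x hx).1)
      have hfuel' : 5 * (board.length * board.length - (s ++ t).length) + (rest ++ t).length ≤ f := by
        simp only [List.length_append, List.length_cons] at hfuel hlen ⊢
        omega
      obtain ⟨s', v'', heq2, hv3, hn3, hmono, ho3, hq3, hcl3⟩ :=
        ih (rest ++ t) v' (s ++ t) hv2 hn2 ho2 hsub' hcl' hq2 hfuel'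
      refine ⟨s', v'', ?_, hv3, hn3, ?_, ho3, hq3, hcl3⟩
      · show bfsLoopA board target (f + 1) (c :: rest) v s = (s', v'')
        rw [bfsLoopA, heq]
        exact heq2
      · exact fun e he => hmono e (List.mem_append.mpr (Or.inl he))


theorem bfsA_run (board : List (List Int)) (target : Int) (P₀ : Int × Int → Prop)
    (x y : Int) (v : List (List Bool)) (hv : pvVisOk board.length v P₀)
    (hok : pvOk board target P₀ (x, y)) :
    ∃ s' v',
      bfsA x y v board target = (s', v') ∧
      pvVisOk board.length v' (fun d => P₀ d ∨ d ∈ s') ∧ s'.Nodup ∧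
      (∀ e, e ∈ s' ↔ pvReach board target P₀ (x, y) e) := by
  have hvis1 : pvVisOk board.length (pvVSet v x y) (fun d => P₀ d ∨ d ∈ [(x, y)]) := by
    have h2 := pvVisOk_set hv hok.1
    exact pvVisOk_congr h2 (fun c _ => by rw [List.mem_singleton]; exact or_comm)
  obtain ⟨s', v', heq, hv3, hn3, hmono, ho3, hq3, hcl3⟩ :=
    bfsLoop_run board target P₀ (pvReach board target P₀ (x, y))
      (fun a d ha hd => Relation.ReflTransGen.tail ha hd)
      (5 * board.length * board.length + 1) [(x, y)] (pvVSet v x y) [(x, y)]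
      hvis1
      (List.nodup_singleton _)
      (by intro e he; rw [List.mem_singleton.mp he]; exact hok)
      (fun e he => he)
      (fun e he hne => absurd he hne)
      (by intro e he; rw [List.mem_singleton.mp he]; exact Relation.ReflTransGen.refl)
      (by simp only [List.length_cons, List.length_nil]
          have h5 : 5 * board.length * board.length = 5 * (board.length * board.length) := by ring
          omega)
  have hback : ∀ e, pvReach board target P₀ (x, y) e → e ∈ s' := by
    intro e hr
    have hr' : Relation.ReflTransGen (pvAdj board target P₀) (x, y) e := hr
    induction hr' with
    | refl => exact hmono _ List.mem_cons_self
    | tail h1 h2 ih => exact hcl3 _ (ih h1) _ h2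
  exact ⟨s', v', heq, hv3, hn3, fun e => ⟨hq3 e, hback e⟩⟩


-- ---- B side ----

theorem contains_false_iff {s : PySem.Set (Int × Int)} {x : Int × Int} :
    PySem.Set.contains s x = false ↔ x ∉ s := by
  rw [← Bool.not_eq_true, PySem.Set.contains_iff]

theorem gstepB_fold (board : List (List Int)) (target : Int) (seen comp : PySem.Set (Int × Int))
    (c : Int × Int) (ds : List (Int × Int)) :
    ∀ g : PySem.Set (Int × Int), (g.Nodup → (ds.foldl (gstepB board target seen comp c) g).Nodup) ∧
      ∀ e, e ∈ ds.foldl (gstepB board target seen comp c) g ↔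
        e ∈ g ∨ ∃ dd ∈ ds, e = (c.1 + dd.1, c.2 + dd.2) ∧
          pvInGrid board.length e ∧ e ∉ comp ∧ e ∉ seen ∧ pvAt board e.1 e.2 = target := by
  induction ds with
  | nil => intro g; exact ⟨fun h => h, fun e => by simp⟩
  | cons dd ds ih =>
    intro g
    rw [List.foldl_cons]
    have hiff : (0 ≤ c.1 + dd.1 ∧ c.1 + dd.1 < PySem.List.len board ∧ 0 ≤ c.2 + dd.2 ∧
        c.2 + dd.2 < PySem.List.len board ∧ PySem.Set.contains comp (c.1 + dd.1, c.2 + dd.2) = false ∧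
        PySem.Set.contains seen (c.1 + dd.1, c.2 + dd.2) = false ∧
        pvAt board (c.1 + dd.1) (c.2 + dd.2) = target) ↔
        (pvInGrid board.length (c.1 + dd.1, c.2 + dd.2) ∧ (c.1 + dd.1, c.2 + dd.2) ∉ comp ∧
         (c.1 + dd.1, c.2 + dd.2) ∉ seen ∧ pvAt board (c.1 + dd.1) (c.2 + dd.2) = target) := by
      constructor
      · rintro ⟨a1, a2, a3, a4, b1, b2, b3⟩
        exact ⟨⟨a1, by simpa [PySem.List.len_eq] using a2, a3, by simpa [PySem.List.len_eq] using a4⟩,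
          contains_false_iff.mp b1, contains_false_iff.mp b2, b3⟩
      · rintro ⟨⟨a1, a2, a3, a4⟩, b1, b2, b3⟩
        exact ⟨a1, by simpa [PySem.List.len_eq] using a2, a3, by simpa [PySem.List.len_eq] using a4,
          contains_false_iff.mpr b1, contains_false_iff.mpr b2, b3⟩
    by_cases hc : 0 ≤ c.1 + dd.1 ∧ c.1 + dd.1 < PySem.List.len board ∧ 0 ≤ c.2 + dd.2 ∧
        c.2 + dd.2 < PySem.List.len board ∧ PySem.Set.contains comp (c.1 + dd.1, c.2 + dd.2) = false ∧
        PySem.Set.contains seen (c.1 + dd.1, c.2 + dd.2) = false ∧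
        pvAt board (c.1 + dd.1) (c.2 + dd.2) = target
    · have hstep : gstepB board target seen comp c g dd =
          PySem.Set.add g (c.1 + dd.1, c.2 + dd.2) := by rw [gstepB]; exact if_pos hc
      rw [hstep]
      obtain ⟨hf1, hf2, hf3, hf4⟩ := hiff.mp hc
      refine ⟨fun hg => (ih _).1 (PySem.Set.nodup_add _ _ hg), fun e => ?_⟩
      rw [(ih _).2 e, PySem.Set.mem_add]
      constructor
      · rintro ((h | h) | ⟨dd', hdd', heq, hf⟩)
        · exact Or.inl h
        · subst h
          exact Or.inr ⟨dd, List.mem_cons_self, rfl, hf1, hf2, hf3, hf4⟩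
        · exact Or.inr ⟨dd', List.mem_cons_of_mem _ hdd', heq, hf⟩
      · rintro (h | ⟨dd', hdd', heq, hf⟩)
        · exact Or.inl (Or.inl h)
        · rcases List.mem_cons.mp hdd' with h' | h'
          · subst h'; exact Or.inl (Or.inr heq)
          · exact Or.inr ⟨dd', h', heq, hf⟩
    · have hstep : gstepB board target seen comp c g dd = g := by rw [gstepB]; exact if_neg hc
      rw [hstep]
      refine ⟨(ih g).1, fun e => ?_⟩
      rw [(ih g).2 e]
      constructor
      · rintro (h | ⟨dd', hdd', heq, hf⟩)
        · exact Or.inl h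
        · exact Or.inr ⟨dd', List.mem_cons_of_mem _ hdd', heq, hf⟩
      · rintro (h | ⟨dd', hdd', heq, hf⟩)
        · exact Or.inl h
        · rcases List.mem_cons.mp hdd' with h' | h'
          · subst h'; subst heq
            exact absurd (hiff.mpr hf) hc
          · exact Or.inr ⟨dd', h', heq, hf⟩

theorem mem_growOnceB (board : List (List Int)) (target : Int) (seen comp : PySem.Set (Int × Int)) :
    (growOnceB board target seen comp).Nodup ∧
    ∀ e, e ∈ growOnceB board target seen comp ↔
      (∃ c ∈ comp, ∃ dd ∈ pvDirs, e = (c.1 + dd.1, c.2 + dd.2) ∧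
        pvInGrid board.length e ∧ e ∉ comp ∧ e ∉ seen ∧ pvAt board e.1 e.2 = target) := by
  have main : ∀ (cs : List (Int × Int)) (g : PySem.Set (Int × Int)),
      (g.Nodup → (cs.foldl (fun g c => pvDirs.foldl (gstepB board target seen comp c) g) g).Nodup) ∧
      ∀ e, e ∈ cs.foldl (fun g c => pvDirs.foldl (gstepB board target seen comp c) g) g ↔
        e ∈ g ∨ ∃ c ∈ cs, ∃ dd ∈ pvDirs, e = (c.1 + dd.1, c.2 + dd.2) ∧
          pvInGrid board.length e ∧ e ∉ comp ∧ e ∉ seen ∧ pvAt board e.1 e.2 = target := by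
    intro cs
    induction cs with
    | nil => intro g; exact ⟨fun h => h, fun e => by simp⟩
    | cons c cs ih =>
      intro g
      rw [List.foldl_cons]
      refine ⟨fun hg => (ih _).1 ((gstepB_fold board target seen comp c pvDirs g).1 hg), fun e => ?_⟩
      rw [(ih _).2 e, (gstepB_fold board target seen comp c pvDirs g).2 e]
      constructor
      · rintro ((h | ⟨dd, hdd, heq, hf⟩) | ⟨c', hc', hrest⟩)
        · exact Or.inl h
        · exact Or.inr ⟨c, List.mem_cons_self, dd, hdd, heq, hf⟩
        · exact Or.inr ⟨c', List.mem_cons_of_mem _ hc', hrest⟩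
      · rintro (h | ⟨c', hc', hrest⟩)
        · exact Or.inl (Or.inl h)
        · rcases List.mem_cons.mp hc' with h' | h'
          · subst h'; exact Or.inl (Or.inr hrest)
          · exact Or.inr ⟨c', h', hrest⟩
  have h := main comp PySem.Set.empty
  rw [show growOnceB board target seen comp =
    comp.foldl (fun g c => pvDirs.foldl (gstepB board target seen comp c) g) PySem.Set.empty from rfl]
  exact ⟨h.1 List.nodup_nil, fun e => by rw [(h.2 e)]; simp [PySem.Set.empty]⟩

theorem satLoop_run (board : List (List Int)) (target : Int) (seen : PySem.Set (Int × Int))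
    (Q : Int × Int → Prop) (hQ : ∀ a d, Q a → pvAdj board target (· ∈ seen) a d → Q d) :
    ∀ (fuel : Nat) (comp : PySem.Set (Int × Int)),
      comp.Nodup → (∀ e ∈ comp, pvOk board target (· ∈ seen) e) → (∀ e ∈ comp, Q e) →
      board.length * board.length + 1 - comp.length ≤ fuel →
      ∃ C, satLoopB board target seen fuel comp = C ∧ C.Nodup ∧ (∀ e ∈ comp, e ∈ C) ∧
        (∀ e ∈ C, pvOk board target (· ∈ seen) e) ∧ (∀ e ∈ C, Q e) ∧
        (∀ e ∈ C, ∀ d, pvAdj board target (· ∈ seen) e d → d ∈ C) := by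
  intro fuel
  induction fuel with
  | zero =>
    intro comp hnd hok hq hfuel
    exfalso
    have hle : comp.length ≤ board.length * board.length :=
      pvLength_le_sq hnd (fun e he => (hok e he).1)
    omega
  | succ f ih =>
    intro comp hnd hok hq hfuel
    have hunf : satLoopB board target seen (f + 1) comp =
        if (growOnceB board target seen comp).isEmpty then comp
        else satLoopB board target seen f (PySem.Set.union comp (growOnceB board target seen comp)) := rfl
    obtain ⟨hgnd, hgmem⟩ := mem_growOnceB board target seen comp
    by_cases hge : (growOnceB board target seen comp).isEmpty = true
    · rw [hunf, if_pos hge]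
      have hnil : growOnceB board target seen comp = [] := List.isEmpty_iff.mp hge
      refine ⟨comp, rfl, hnd, fun e he => he, hok, hq, ?_⟩
      intro e he d hd
      obtain ⟨⟨dd, hdd, hdeq⟩, hokd⟩ := hd
      by_cases hdc : d ∈ comp
      · exact hdc
      · exfalso
        have : d ∈ growOnceB board target seen comp :=
          (hgmem d).mpr ⟨e, he, dd, hdd, hdeq, hokd.1, hdc, hokd.2.2, hokd.2.1⟩
        rw [hnil] at this
        exact absurd this (List.not_mem_nil)
    · rw [hunf, if_neg hge]
      have hgne : growOnceB board target seen comp ≠ [] := by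
        intro hcon; rw [hcon] at hge; exact hge rfl
      obtain ⟨e0, he0⟩ := List.exists_mem_of_ne_nil _ hgne
      obtain ⟨_, _, _, _, _, hgrid0, hnc0, _, _⟩ := (hgmem e0).mp he0
      have hndU : (PySem.Set.union comp (growOnceB board target seen comp)).Nodup :=
        PySem.Set.nodup_union _ _ hnd
      have hsubU : ∀ x ∈ comp, x ∈ PySem.Set.union comp (growOnceB board target seen comp) :=
        fun x hx => (PySem.Set.mem_union _ _ _).mpr (Or.inl hx)
      have hokU : ∀ x ∈ PySem.Set.union comp (growOnceB board target seen comp),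
          pvOk board target (· ∈ seen) x := by
        intro x hx
        rcases (PySem.Set.mem_union _ _ _).mp hx with h' | h'
        · exact hok x h'
        · obtain ⟨_, _, _, _, _, hgrid, _, hns, ht⟩ := (hgmem x).mp h'
          exact ⟨hgrid, ht, hns⟩
      have hqU : ∀ x ∈ PySem.Set.union comp (growOnceB board target seen comp), Q x := by
        intro x hx
        rcases (PySem.Set.mem_union _ _ _).mp hx with h' | h'
        · exact hq x h'
        · obtain ⟨c, hc, dd, hdd, hdeq, hgrid, _, hns, ht⟩ := (hgmem x).mp h'
          exact hQ c x (hq c hc) ⟨⟨dd, hdd, hdeq⟩, hgrid, ht, hns⟩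
      have hlt : comp.length < (PySem.Set.union comp (growOnceB board target seen comp)).length :=
        pvLength_lt_of_extra hndU hsubU ((PySem.Set.mem_union _ _ _).mpr (Or.inr he0)) hnc0 hnd
      have hfuel' : board.length * board.length + 1 -
          (PySem.Set.union comp (growOnceB board target seen comp)).length ≤ f := by omega
      obtain ⟨C, heq, hCnd, hCsub, hCok, hCq, hCcl⟩ := ih _ hndU hokU hqU hfuel'
      exact ⟨C, heq, hCnd, fun x hx => hCsub x (hsubU x hx), hCok, hCq, hCcl⟩


theorem satB_run (board : List (List Int)) (target : Int) (seen : PySem.Set (Int × Int))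
    (p : Int × Int) (hok : pvOk board target (· ∈ seen) p) :
    ∃ C, satLoopB board target seen (board.length * board.length + 1) (PySem.Set.add PySem.Set.empty p) = C ∧
      C.Nodup ∧ (∀ e, e ∈ C ↔ pvReach board target (· ∈ seen) p e) := by
  have hc0 : (PySem.Set.add (PySem.Set.empty : PySem.Set (Int × Int)) p) = [p] := rfl
  obtain ⟨C, heq, hCnd, hCsub, hCok, hCq, hCcl⟩ :=
    satLoop_run board target seen (pvReach board target (· ∈ seen) p)
      (fun a d ha hd => Relation.ReflTransGen.tail ha hd)
      (board.length * board.length + 1) (PySem.Set.add PySem.Set.empty p)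
      (by rw [hc0]; exact List.nodup_singleton _)
      (by rw [hc0]; intro e he; rw [List.mem_singleton.mp he]; exact hok)
      (by rw [hc0]; intro e he; rw [List.mem_singleton.mp he]; exact Relation.ReflTransGen.refl)
      (by rw [hc0]; simp only [List.length_cons, List.length_nil]; omega)
  have hback : ∀ e, pvReach board target (· ∈ seen) p e → e ∈ C := by
    intro e hr
    have hr' : Relation.ReflTransGen (pvAdj board target (· ∈ seen)) p e := hr
    induction hr' with
    | refl => exact hCsub p (by rw [hc0]; exact List.mem_cons_self)
    | tail h1 h2 ih => exact hCcl _ (ih h1) _ h2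
  exact ⟨C, heq, hCnd, fun e => ⟨hCq e, hback e⟩⟩


-- ---- normalize ----

theorem sorted2_eq_sorted_toLex (xs : List (Int × Int)) :
    PySem.List.sorted2 xs (fun p => p.1) (fun p => p.2) =
    PySem.List.sorted xs (fun p => toLex p) := by
  rw [PySem.List.sorted_eq_foldl_insertBy]
  have hfun : (fun (a b : Int × Int) =>
      decide (a.1 < b.1) || (!decide (b.1 < a.1) && decide (a.2 < b.2))) =
      (fun (a b : Int × Int) => decide (toLex a < toLex b)) := by
    funext a b
    rw [Bool.eq_iff_iff]
    simp only [Bool.or_eq_true, Bool.and_eq_true, Bool.not_eq_true', decide_eq_true_eq,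
      decide_eq_false_iff_not, Prod.Lex.lt_iff, ofLex_toLex]
    constructor
    · rintro (h | ⟨h2, h3⟩)
      · exact Or.inl h
      · by_cases h1 : a.1 < b.1
        · exact Or.inl h1
        · exact Or.inr ⟨by omega, h3⟩
    · rintro (h | ⟨h1, h2⟩)
      · exact Or.inl h
      · exact Or.inr ⟨by omega, h2⟩
  show List.foldl (fun acc x => PySem.List.insertBy (fun a b =>
      decide (a.1 < b.1) || (!decide (b.1 < a.1) && decide (a.2 < b.2))) x acc) [] xs = _
  rw [hfun]

theorem min_getD_eq_of_perm {xs ys : List Int} (h : xs.Perm ys) :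
    (PySem.List.min? xs (fun x => x)).getD 0 = (PySem.List.min? ys (fun x => x)).getD 0 := by
  rcases hxs : PySem.List.min? xs (fun x => x) with _ | m
  · have hxnil : xs = [] := (PySem.List.min?_eq_none_iff _ _).mp hxs
    subst hxnil
    have hynil : ys = [] := List.Perm.eq_nil h.symm
    subst hynil
    rfl
  · rcases hys : PySem.List.min? ys (fun x => x) with _ | m'
    · have hynil : ys = [] := (PySem.List.min?_eq_none_iff _ _).mp hys
      subst hynil
      have hxnil : xs = [] := List.Perm.eq_nil h
      subst hxnil
      have hnone : (PySem.List.min? ([] : List Int) (fun x => x)) = none :=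
        (PySem.List.min?_eq_none_iff _ _).mpr rfl
      rw [hnone] at hxs
      exact (Option.some_ne_none m hxs.symm).elim
    · simp only [Option.getD_some]
      exact le_antisymm
        (PySem.List.min?_isMin hxs m' (h.mem_iff.mpr (PySem.List.min?_mem hys)))
        (PySem.List.min?_isMin hys m (h.symm.mem_iff.mpr (PySem.List.min?_mem hxs)))

theorem pvNormalize_eq {sA sB : List (Int × Int)} (hA : sA.Nodup) (hB : sB.Nodup)
    (hm : ∀ e, e ∈ sA ↔ e ∈ sB) : normalizeA sA = normalizeB sB := by
  have hperm : sA.Perm sB := (List.perm_ext_iff_of_nodup hA hB).mpr hm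
  have hmx : (PySem.List.min? (sA.map (fun p => p.1)) (fun x => x)).getD 0 =
      (PySem.List.min? (sB.map (fun p => p.1)) (fun x => x)).getD 0 :=
    min_getD_eq_of_perm (hperm.map _)
  have hmy : (PySem.List.min? (sA.map (fun p => p.2)) (fun x => x)).getD 0 =
      (PySem.List.min? (sB.map (fun p => p.2)) (fun x => x)).getD 0 :=
    min_getD_eq_of_perm (hperm.map _)
  rw [normalizeA, normalizeB, hmx, hmy, sorted2_eq_sorted_toLex, sorted2_eq_sorted_toLex]
  exact PySem.List.sorted_eq_sorted_of_perm _ _ _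
    (fun a b hab => by simpa using congrArg ofLex hab) (hperm.map _)


-- ---- outer loop ----

theorem foldl_foldl_flatMap {σ α β : Type} (l₁ : List α) (l₂ : List β) (g : σ → α × β → σ) :
    ∀ init : σ,
      l₁.foldl (fun st i => l₂.foldl (fun st j => g st (i, j)) st) init =
      (l₁.flatMap (fun i => l₂.map (fun j => (i, j)))).foldl g init := by
  induction l₁ with
  | nil => intro init; simp
  | cons a l ih => intro init; simp [List.foldl_append, List.foldl_map, ih]

theorem outerBodyA_eq (board : List (List Int)) (target : Int) (vA : List (List Bool))
    (sh : List (List (Int × Int))) (p : Int × Int) :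
    outerBodyA board target (vA, sh) p =
      if pvVAt vA p.1 p.2 = false ∧ pvAt board p.1 p.2 = target then
        ((bfsA p.1 p.2 vA board target).2, sh ++ [normalizeA (bfsA p.1 p.2 vA board target).1])
      else (vA, sh) := rfl

theorem outerBodyB_eq (board : List (List Int)) (target : Int) (seen : PySem.Set (Int × Int))
    (sh : List (List (Int × Int))) (p : Int × Int) :
    outerBodyB board target (seen, sh) p =
      if PySem.Set.contains seen p = false ∧ pvAt board p.1 p.2 = target then
        (PySem.Set.union seen
          (satLoopB board target seen (board.length * board.length + 1) (PySem.Set.add PySem.Set.empty p)),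
         sh ++ [normalizeB
          (satLoopB board target seen (board.length * board.length + 1) (PySem.Set.add PySem.Set.empty p))])
      else (seen, sh) := rfl

theorem outer_rel (board : List (List Int)) (target : Int) :
    ∀ (ps : List (Int × Int)), (∀ p ∈ ps, pvInGrid board.length p) →
    ∀ (vA : List (List Bool)) (seen : PySem.Set (Int × Int)) (sh : List (List (Int × Int))),
      seen.Nodup → pvVisOk board.length vA (· ∈ seen) →
      (ps.foldl (outerBodyA board target) (vA, sh)).2 =
      (ps.foldl (outerBodyB board target) (seen, sh)).2 := by
  intro ps
  induction ps with
  | nil => intro _ vA seen sh _ _; rfl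
  | cons p ps ih =>
    intro hps vA seen sh hsnd hvis
    have hgrid : pvInGrid board.length p := hps p List.mem_cons_self
    have hps' : ∀ q ∈ ps, pvInGrid board.length q := fun q hq => hps q (List.mem_cons_of_mem _ hq)
    have hv1 : pvVAt vA p.1 p.2 = false ↔ p ∉ seen := by
      rw [Bool.eq_false_iff]
      exact not_congr (hvis.2.2 p hgrid)
    rw [List.foldl_cons, List.foldl_cons, outerBodyA_eq, outerBodyB_eq]
    by_cases hg : pvVAt vA p.1 p.2 = false ∧ pvAt board p.1 p.2 = target
    · have hokp : pvOk board target (· ∈ seen) p := ⟨hgrid, hg.2, hv1.mp hg.1⟩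
      obtain ⟨sA, vA', heqA, hvisA', hndA, hmemA⟩ :=
        bfsA_run board target (· ∈ seen) p.1 p.2 vA hvis hokp
      obtain ⟨C, heqB, hCnd, hmemB⟩ := satB_run board target seen p hokp
      have hgB : PySem.Set.contains seen p = false ∧ pvAt board p.1 p.2 = target :=
        ⟨contains_false_iff.mpr (hv1.mp hg.1), hg.2⟩
      rw [if_pos hg, if_pos hgB, heqA, heqB]
      have hmeq : ∀ e, e ∈ sA ↔ e ∈ C := fun e => (hmemA e).trans (hmemB e).symm
      have hnorm : normalizeA sA = normalizeB C := pvNormalize_eq hndA hCnd hmeq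
      show (ps.foldl (outerBodyA board target) (vA', sh ++ [normalizeA sA])).2 =
        (ps.foldl (outerBodyB board target) (PySem.Set.union seen C, sh ++ [normalizeB C])).2
      rw [hnorm]
      refine ih hps' vA' (PySem.Set.union seen C) _ (PySem.Set.nodup_union _ _ hsnd) ?_
      refine pvVisOk_congr hvisA' (fun c _ => ?_)
      rw [PySem.Set.mem_union]
      exact or_congr Iff.rfl (hmeq c)
    · have hgB : ¬ (PySem.Set.contains seen p = false ∧ pvAt board p.1 p.2 = target) := by
        intro hcon
        exact hg ⟨hv1.mpr (contains_false_iff.mp hcon.1), hcon.2⟩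
      rw [if_neg hg, if_neg hgB]
      exact ih hps' vA seen sh hsnd hvis


-- ===== VERDICT (by name: the statement is the Claim_ definition above) =====
theorem extract_shapes_spec : Claim_equal_extract_shapes := by
  intro board target _hdom _hpre
  unfold Spec_extract_shapes extract_shapes extract_shapes_alt
  rw [foldl_foldl_flatMap, foldl_foldl_flatMap]
  apply outer_rel
  · intro p hp
    simp only [List.mem_flatMap, List.mem_map] at hp
    obtain ⟨i, hi, j, hj, rfl⟩ := hp
    rw [PySem.List.mem_pyRange_one] at hi hj
    simp only [PySem.List.len_eq] at hi hj
    exact ⟨hi.1, hi.2, hj.1, hj.2⟩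
  · exact List.nodup_nil
  · exact pvVisOk_congr (pvVisOk_init board.length) (by simp [PySem.Set.empty])
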